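-- pv_equiv track=rewrite | github.com/alannaa/DataScience_LanguagePredictorTool | ds2000P1Alanna.py | createTrigramDict
-- ===== SOURCE A (Python) =====
-- def createTrigramDict(string):
--     triDict = {}
--     for i in range(len(string)):
--         if(string[i:(i+3)] in triDict.keys()):
--             triDict[string[i:(i+3)]] += 1
--         else:
--             triDict[string[i:(i+3)]] = 1
--     return triDict
-- ===== SOURCE B (Python) =====
-- def createTrigramDict(string):
--     subs = [string[i:i+3] for i in range(len(string))]
--     counts = {}
--     run_key, run_len = None, 0
--     for s in sorted(subs):
--         if s == run_key:
--             run_len += 1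
--         else:
--             if run_key is not None:
--                 counts[run_key] = run_len
--             run_key, run_len = s, 1
--     if run_key is not None:
--         counts[run_key] = run_len
--     return {s: counts[s] for s in dict.fromkeys(subs)}
-- ===== Notes on version B (the rewrite author's own statement) =====
-- stated objective: alternative
-- what changed: B counts by sort-then-group: it builds the slice list, sorts it, scans the sorted list once tallying consecutive runs of equal slices into a counts table, and finally emits the counts in first-occurrence order; A instead accumulates counts hash-style with an if/else dict update inside the main loop.
import Mathlib
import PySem

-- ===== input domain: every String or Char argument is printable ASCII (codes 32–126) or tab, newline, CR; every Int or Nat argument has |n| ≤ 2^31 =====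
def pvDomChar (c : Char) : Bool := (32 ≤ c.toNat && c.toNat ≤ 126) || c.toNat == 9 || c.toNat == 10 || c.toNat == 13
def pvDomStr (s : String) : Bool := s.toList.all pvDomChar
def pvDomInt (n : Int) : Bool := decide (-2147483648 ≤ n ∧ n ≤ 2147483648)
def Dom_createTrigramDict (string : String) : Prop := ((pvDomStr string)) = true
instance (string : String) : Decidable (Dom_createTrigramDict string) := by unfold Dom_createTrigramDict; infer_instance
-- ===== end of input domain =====

-- B counts by sort-then-group (sort the slice list, tally consecutive runs in one scan, emit in
-- first-occurrence order) instead of A's incremental if/else dict accumulation; same values, not claimed faster.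

-- ===== PORT A =====
def createTrigramDict (string : String) : List (String × Int) :=
  ((PySem.List.pyRange 0 (PySem.Str.len string) 1).foldl
    (fun d i =>
      if d.contains (PySem.Str.slice string (some i) (some (i + 3))) then
        d.modify (PySem.Str.slice string (some i) (some (i + 3))) 0 (· + 1)
      else
        d.insert (PySem.Str.slice string (some i) (some (i + 3))) 1)
    PySem.Dict.empty).items

-- ===== PORT B =====
-- the run-tallying loop of Source B: state (counts, run_key, run_len); the trailing
-- 'if run_key is not None: counts[run_key] = run_len' is the [] case
def pvRunFold (l : List String) (counts : PySem.Dict String Int)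
    (runKey : Option String) (runLen : Int) : PySem.Dict String Int :=
  match l with
  | [] =>
      match runKey with
      | some k => counts.insert k runLen
      | none => counts
  | s :: rest =>
      if runKey = some s then pvRunFold rest counts runKey (runLen + 1)
      else
        match runKey with
        | some k => pvRunFold rest (counts.insert k runLen) (some s) 1
        | none => pvRunFold rest counts (some s) 1

def createTrigramDict_alt (string : String) : List (String × Int) :=
  let subs := (PySem.List.pyRange 0 (PySem.Str.len string) 1).map
      (fun i => PySem.Str.slice string (some i) (some (i + 3)))
  let cnt := pvRunFold (PySem.List.sorted subs (fun s => s) false) PySem.Dict.empty none 0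
  -- counts[s]: every s ∈ dedup subs occurs in sorted subs, so the key is present and getD is exact
  ((PySem.List.dedup subs).foldl
      (fun d s => d.insert s (cnt.getD s 0))
      PySem.Dict.empty).items

-- ===== PRECONDITION & SPEC =====
def Spec_createTrigramDict (string : String) (out : List (String × Int)) : Prop := out = createTrigramDict_alt string
instance (string : String) (out : List (String × Int)) : Decidable (Spec_createTrigramDict string out) := by unfold Spec_createTrigramDict; infer_instance

-- ===== CLAIM (what is proved, stated in full; the proofs are below) =====
def Claim_equal_createTrigramDict : Prop := ∀ (string : String), Dom_createTrigramDict string → Spec_createTrigramDict string (createTrigramDict string)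

-- ===== LEMMAS AND PROOFS =====

-- A's loop body (guarded increment-or-insert-1) is pointwise the Counter step d.modify s 0 (·+1).
theorem createTrigramDict_stepA_eq (d : PySem.Dict String Int) (s : String) :
    (if d.contains s then d.modify s 0 (· + 1) else d.insert s 1) = d.modify s 0 (· + 1) := by
  by_cases h : d.contains s
  · simp [h]
  · simp only [Bool.not_eq_true] at h
    simp [h, PySem.Dict.modify, PySem.Dict.insert, PySem.Dict.getD_of_not_contains d 0 h]

-- invariant of the run scan: on a sorted tail whose elements are all ≥ the open run's key k,
-- with every key already in counts strictly below k, the final table holds old counts plus the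
-- open run plus the tail's multiplicities.
theorem pvRunFold_getD (l : List String) (counts : PySem.Dict String Int) (k : String) (n : Int)
    (hs : l.Pairwise (· ≤ ·)) (hge : ∀ x ∈ l, k ≤ x)
    (hlt : ∀ t, counts.contains t = true → t < k) (t : String) :
    (pvRunFold l counts (some k) n).getD t 0
      = counts.getD t 0 + (if t = k then n else 0) + (l.count t : Int) := by
  induction l generalizing counts k n with
  | nil =>
      have hk : counts.contains k = false := by
        cases hck : counts.contains k with
        | false => rfl
        | true => exact absurd (hlt k hck) (lt_irrefl k)
      simp only [pvRunFold, PySem.Dict.getD_insert, List.count_nil]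
      by_cases ht : t = k
      · subst ht
        simp [PySem.Dict.getD_of_not_contains counts 0 hk]
      · simp [ht]
  | cons s rest ih =>
      by_cases hks : k = s
      · subst hks
        rw [show pvRunFold (k :: rest) counts (some k) n
              = pvRunFold rest counts (some k) (n + 1) from by simp [pvRunFold]]
        rw [ih counts k (n + 1) hs.of_cons
            (fun x hx => List.rel_of_pairwise_cons hs hx) hlt]
        simp only [List.count_cons, beq_iff_eq]
        push_cast
        split_ifs <;> first | omega | (simp_all; try omega)
      · have hkls : k < s := lt_of_le_of_ne (hge s List.mem_cons_self) hks
        have hk0 : counts.getD k 0 = 0 := by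
          apply PySem.Dict.getD_of_not_contains
          cases hck : counts.contains k with
          | false => rfl
          | true => exact absurd (hlt k hck) (lt_irrefl k)
        rw [show pvRunFold (s :: rest) counts (some k) n
              = pvRunFold rest (counts.insert k n) (some s) 1 from by
            simp [pvRunFold, hks]]
        rw [ih (counts.insert k n) s 1 hs.of_cons
            (fun x hx => List.rel_of_pairwise_cons hs hx)
            (fun u hu => by
              rw [PySem.Dict.contains_insert] at hu
              rcases Bool.or_eq_true_iff.mp hu with h | h
              · have : u = k := by simpa using h
                exact this ▸ hkls
              · exact lt_trans (hlt u h) hkls)]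
        rw [PySem.Dict.getD_insert]
        simp only [List.count_cons, beq_iff_eq]
        push_cast
        split_ifs <;> first | omega | (simp_all; try omega)

-- run scan from the empty state on a sorted list is exactly the multiplicity table
theorem pvRunFold_count (l : List String) (hs : l.Pairwise (· ≤ ·)) (t : String) :
    (pvRunFold l PySem.Dict.empty none 0).getD t 0 = (l.count t : Int) := by
  cases l with
  | nil => simp [pvRunFold, PySem.Dict.getD_empty]
  | cons s rest =>
      rw [show pvRunFold (s :: rest) PySem.Dict.empty none 0
            = pvRunFold rest PySem.Dict.empty (some s) 1 from by simp [pvRunFold]]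
      rw [pvRunFold_getD rest PySem.Dict.empty s 1 hs.of_cons
          (fun x hx => List.rel_of_pairwise_cons hs hx)
          (fun u hu => by simp [PySem.Dict.contains_empty] at hu) t]
      simp only [List.count_cons, beq_iff_eq, PySem.Dict.getD_empty]
      push_cast
      split_ifs <;> first | omega | (simp_all; try omega)

-- ===== VERDICT (by name: the statement is the Claim_ definition above) =====
theorem createTrigramDict_spec : Claim_equal_createTrigramDict := by
  intro string _
  unfold Spec_createTrigramDict createTrigramDict createTrigramDict_alt
  rw [← List.foldl_map (f := fun i => PySem.Str.slice string (some i) (some (i + 3)))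
      (g := fun (d : PySem.Dict String Int) s =>
        if d.contains s = true then d.modify s 0 (fun x => x + 1) else d.insert s 1)]
  set subs := (PySem.List.pyRange 0 (PySem.Str.len string) 1).map
      (fun i => PySem.Str.slice string (some i) (some (i + 3)))
  have h1 : (fun (d : PySem.Dict String Int) s =>
      if d.contains s = true then d.modify s 0 (fun x => x + 1) else d.insert s 1)
      = fun d s => d.modify s 0 (fun x => x + 1) := by
    funext d s; exact createTrigramDict_stepA_eq d s
  rw [h1, ← PySem.Dict.counter_eq_foldl, PySem.Dict.items_counter]
  have hcnt : ∀ t : String,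
      (pvRunFold (PySem.List.sorted subs (fun s => s) false) PySem.Dict.empty none 0).getD t 0
        = (subs.count t : Int) := by
    intro t
    rw [pvRunFold_count _ (by simpa using PySem.List.sorted_pairwise subs (fun s => s)) t,
        (PySem.List.sorted_perm subs (fun s => s) false).count_eq t]
  have h2 : (fun (d : PySem.Dict String Int) s =>
      d.insert s ((pvRunFold (PySem.List.sorted subs (fun s => s) false)
        PySem.Dict.empty none 0).getD s 0))
      = fun d s => d.insert s ((subs.count s : Int)) := by
    funext d s; rw [hcnt s]
  simp only [h2]
  rw [PySem.Dict.items_foldl_insert_fresh (PySem.List.dedup subs) (fun s => s)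
      (fun s => (subs.count s : Int)) PySem.Dict.empty
      (by intro a _; exact PySem.Dict.contains_empty a)
      (by simp [PySem.List.dedup_eq_ofList, PySem.Set.nodup_ofList subs])]
  simp [PySem.List.dedup_eq_ofList]
  rfl
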